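-- pv_equiv track=rewrite | github.com/pypi-data/pypi-mirror-361 | packages/quaestor/quaestor-0.2.4-py3-none-any.whl/quaestor/converters.py | _format_timeline_section
-- ===== SOURCE A (Python) =====
-- def _section_wrapper(section_id: str, title: str) -> str:
--     """Create section wrapper with title."""
--     return f"\n<!-- SECTION:{section_id}:START -->\n## {title}\n\n"
--
-- def _yaml_block(block_id: str, data: dict) -> str:
--     """Create a YAML data block."""
--     result = f"<!-- DATA:{block_id}:START -->\n```yaml\n"
--
--     def format_value(value, indent=""):
--         if isinstance(value, list):
--             output = ""
--             for item in value:
--                 if isinstance(item, dict):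
--                     output += f"{indent}- "
--                     first = True
--                     for k, v in item.items():
--                         if first:
--                             if isinstance(v, list | dict):
--                                 output += f"{k}:\n"
--                                 output += format_value(v, indent + "  ")
--                             else:
--                                 output += f'{k}: "{v}"\n'
--                             first = False
--                         else:
--                             if isinstance(v, list | dict):
--                                 output += f"{indent}  {k}:\n"
--                                 output += format_value(v, indent + "    ")
--                             else:
--                                 output += f'{indent}  {k}: "{v}"\n'
--                 else:
--                     output += f'{indent}- "{item}"\n'
--             return output
--         elif isinstance(value, dict):
--             output = ""
--             for k, v in value.items():
--                 if isinstance(v, list | dict):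
--                     output += f"{indent}{k}:\n"
--                     output += format_value(v, indent + "  ")
--                 else:
--                     output += f'{indent}{k}: "{v}"\n'
--             return output
--         else:
--             return f'"{value}"\n'
--
--     for key, value in data.items():
--         result += f"{key}:\n" if isinstance(value, list | dict) else f"{key}: "
--         result += format_value(value, "  ")
--
--     result += "```\n<!-- DATA:" + block_id + ":END -->\n"
--     return result
--
-- def _format_timeline_section(title: str, content: list[str]) -> str:
--     """Format timeline/milestone section."""
--     result = _section_wrapper("memory:timeline", title)
--
--     # Look for milestone-like structures
--     milestones = []
--     current_milestone = None
--
--     for line in content: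
--         if line.strip().startswith(("### Week", "### Phase")):
--             if current_milestone:
--                 milestones.append(current_milestone)
--             milestone_line = line.strip()[4:]
--             status = "planned"
--             if "CURRENT" in milestone_line:
--                 status = "current"
--             elif "Complete" in milestone_line:
--                 status = "completed"
--             current_milestone = {"name": milestone_line, "status": status}
--         elif current_milestone:
--             if "CURRENT" in line:
--                 current_milestone["status"] = "current"
--             elif "✅" in line or "Complete" in line:
--                 current_milestone["status"] = "completed"
--             elif "Goal:" in line:
--                 current_milestone["goal"] = line.split(":", 1)[1].strip()
--
--     if current_milestone:
--         milestones.append(current_milestone)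
--
--     if milestones:
--         milestone_data = []
--         for i, m in enumerate(milestones):
--             data = {"id": f"milestone_{i + 1}", "name": m["name"], "status": m["status"]}
--             if "goal" in m:
--                 data["goal"] = m["goal"]
--             milestone_data.append(data)
--         result += _yaml_block("milestones", {"milestones": milestone_data}) + "\n"
--
--     return result + "\n".join(content) + "\n<!-- SECTION:memory:timeline:END -->\n"
-- ===== SOURCE B (Python) =====
-- # B: two-phase decomposition — a single reversed pass splits content into (header, body)
-- # blocks, each block is summarized by backward searches (last status/goal line wins), and
-- # the YAML rows are emitted directly as strings instead of dicts fed to a generic formatter.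
--
-- def _is_header(line):
--     s = line.strip()
--     return s.startswith("### Week") or s.startswith("### Phase")
--
-- def _status_line(ln):
--     return "CURRENT" in ln or "\u2705" in ln or "Complete" in ln
--
-- def _status(header, body):
--     for ln in reversed(body):
--         if "CURRENT" in ln:
--             return "current"
--         if "\u2705" in ln or "Complete" in ln:
--             return "completed"
--     if "CURRENT" in header:
--         return "current"
--     if "Complete" in header:
--         return "completed"
--     return "planned"
--
-- def _goal(body):
--     for ln in reversed(body):
--         if _status_line(ln):
--             continue
--         if "Goal:" in ln:
--             return ln.split(":", 1)[1].strip()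
--     return None
--
-- def _format_timeline_section(title: str, content: list[str]) -> str:
--     blocks = []
--     rev_body = []
--     for line in reversed(content):
--         if _is_header(line):
--             rev_body.reverse()
--             blocks.append((line.strip()[4:], rev_body))
--             rev_body = []
--         else:
--             rev_body.append(line)
--     blocks.reverse()
--
--     yaml = ""
--     if blocks:
--         rows = []
--         for k, (name, blines) in enumerate(blocks, 1):
--             row = f'  - id: "milestone_{k}"\n    name: "{name}"\n    status: "{_status(name, blines)}"\n'
--             goal = _goal(blines)
--             if goal is not None:
--                 row += f'    goal: "{goal}"\n'
--             rows.append(row)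
--         yaml = ('<!-- DATA:milestones:START -->\n```yaml\nmilestones:\n'
--                 + "".join(rows) + '```\n<!-- DATA:milestones:END -->\n\n')
--
--     return ("\n<!-- SECTION:memory:timeline:START -->\n## " + title + "\n\n"
--             + yaml + "\n".join(content) + "\n<!-- SECTION:memory:timeline:END -->\n")
-- ===== Notes on version B (the rewrite author's own statement) =====
-- stated objective: alternative
-- what changed: A's single stateful pass (an open 'current milestone' dict mutated line by line, then a generic recursive dict-to-YAML formatter) is replaced by a two-phase decomposition: one reversed pass splits the lines into (header, body) blocks, each block is summarized by backward searches in which the last status/goal line wins, and the YAML rows are emitted directly as format strings.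
import Mathlib
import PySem

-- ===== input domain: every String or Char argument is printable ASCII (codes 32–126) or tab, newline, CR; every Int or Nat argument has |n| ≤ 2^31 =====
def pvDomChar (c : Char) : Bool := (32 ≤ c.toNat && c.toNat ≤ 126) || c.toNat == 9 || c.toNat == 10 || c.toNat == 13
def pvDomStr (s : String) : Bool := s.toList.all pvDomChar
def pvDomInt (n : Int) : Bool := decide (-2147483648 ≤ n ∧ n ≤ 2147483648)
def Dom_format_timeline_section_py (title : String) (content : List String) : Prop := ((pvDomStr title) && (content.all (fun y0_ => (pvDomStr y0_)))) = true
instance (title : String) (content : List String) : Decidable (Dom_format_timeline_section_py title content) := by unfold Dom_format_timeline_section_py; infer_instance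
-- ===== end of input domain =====

-- B replaces A's single stateful pass (open "current milestone" dict mutated line by line,
-- then a generic dict→YAML formatter) by a different decomposition: one reversed pass splits
-- the lines into (header, body) blocks, each block is summarized by backward searches
-- (last status/goal line wins), and the YAML rows are emitted directly as strings.
-- Objective: alternative (same cost, different structure); equivalence proved below.
-- Strings are ported on the List Char side (PySem.Chars), as the PySem prelude prescribes.

-- ===== PORT A =====
-- milestone dict = (name, status, goal?); in A the "goal" key is only ever added after
-- "name"/"status", so the fixed triple is the exact insertion-ordered dict.

-- the elif-chain A runs on a non-header line when a current milestone is open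
def pvA_upd (m : List Char × List Char × Option (List Char)) (line : List Char) :
    List Char × List Char × Option (List Char) :=
  if PySem.Chars.isIn "CURRENT".toList line then (m.1, "current".toList, m.2.2)
  else if PySem.Chars.isIn "✅".toList line || PySem.Chars.isIn "Complete".toList line then
    (m.1, "completed".toList, m.2.2)
  else if PySem.Chars.isIn "Goal:".toList line then
    (m.1, m.2.1, some (PySem.Chars.strip ((PySem.Chars.splitOnMax line ":".toList 1).getD 1 [])))
  else m

-- the header branch: fresh milestone from milestone_line
def pvA_new (ml : List Char) : List Char × List Char × Option (List Char) :=
  (ml,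
   if PySem.Chars.isIn "CURRENT".toList ml then "current".toList
   else if PySem.Chars.isIn "Complete".toList ml then "completed".toList
   else "planned".toList,
   none)

-- one iteration of A's for-loop; state = (milestones, current_milestone)
def pvA_step
    (st : List (List Char × List Char × Option (List Char)) ×
          Option (List Char × List Char × Option (List Char)))
    (line : List Char) :
    List (List Char × List Char × Option (List Char)) ×
    Option (List Char × List Char × Option (List Char)) :=
  let s := PySem.Chars.strip line
  if PySem.Chars.startswith s "### Week".toList || PySem.Chars.startswith s "### Phase".toList then
    ((match st.2 with | some m => st.1 ++ [m] | none => st.1),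
     some (pvA_new (PySem.List.slice s (some 4) none)))
  else
    match st.2 with
    | none => st
    | some m => (st.1, some (pvA_upd m line))

-- milestone_data: enumerate(milestones) → dict {"id","name","status"(,"goal")}
def pvA_mdata (milestones : List (List Char × List Char × Option (List Char))) :
    List (List (List Char × List Char)) :=
  (PySem.List.enumerate milestones 0).map (fun im =>
    [("id".toList, "milestone_".toList ++ PySem.Int.toChars (im.1 + 1)),
     ("name".toList, im.2.1), ("status".toList, im.2.2.1)]
    ++ (match im.2.2.2 with | some g => [("goal".toList, g)] | none => []))

-- _yaml_block's format_value on the list-of-dicts actually passed (every value a string,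
-- so only the list/dict-item/scalar branches A executes are transcribed; exact for this call)
def pvA_item (indent : List Char) (out : List Char) (item : List (List Char × List Char)) :
    List Char :=
  (item.foldl (fun (p : List Char × Bool) kv =>
      if p.2 then (p.1 ++ kv.1 ++ ": \"".toList ++ kv.2 ++ "\"\n".toList, false)
      else (p.1 ++ indent ++ "  ".toList ++ kv.1 ++ ": \"".toList ++ kv.2 ++ "\"\n".toList, false))
    (out ++ indent ++ "- ".toList, true)).1

def pvA_items (indent : List Char) (items : List (List (List Char × List Char))) : List Char :=
  items.foldl (pvA_item indent) []

-- _yaml_block("milestones", {"milestones": milestone_data})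
def pvA_yaml (md : List (List (List Char × List Char))) : List Char :=
  "<!-- DATA:milestones:START -->\n```yaml\n".toList
  ++ "milestones".toList ++ ":\n".toList
  ++ pvA_items "  ".toList md
  ++ "```\n<!-- DATA:".toList ++ "milestones".toList ++ ":END -->\n".toList

def format_timeline_section_py (title : String) (content : List String) : String :=
  let contentL := content.map String.toList
  let res0 := "\n<!-- SECTION:".toList ++ "memory:timeline".toList ++ ":START -->\n## ".toList
              ++ title.toList ++ "\n\n".toList
  let st := contentL.foldl pvA_step ([], none)
  let milestones := match st.2 with | some m => st.1 ++ [m] | none => st.1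
  let res1 := if milestones.isEmpty then res0
              else res0 ++ pvA_yaml (pvA_mdata milestones) ++ "\n".toList
  String.ofList (res1 ++ PySem.Chars.join "\n".toList contentL
             ++ "\n<!-- SECTION:memory:timeline:END -->\n".toList)

-- ===== PORT B =====
def pvB_isHeader (line : List Char) : Bool :=
  let s := PySem.Chars.strip line
  PySem.Chars.startswith s "### Week".toList || PySem.Chars.startswith s "### Phase".toList

-- single reversed pass: blocks (header, body) in order, leading non-header lines discarded
def pvB_split (content : List (List Char)) :
    List (List Char × List (List Char)) × List (List Char) :=
  content.foldr (fun line bp =>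
    if pvB_isHeader line then
      ((PySem.List.slice (PySem.Chars.strip line) (some 4) none, bp.2) :: bp.1, [])
    else (bp.1, line :: bp.2)) ([], [])

def pvB_statusLine (ln : List Char) : Bool :=
  PySem.Chars.isIn "CURRENT".toList ln || PySem.Chars.isIn "✅".toList ln
  || PySem.Chars.isIn "Complete".toList ln

def pvB_status (h : List Char) (body : List (List Char)) : List Char :=
  match body.reverse.find? pvB_statusLine with
  | some ln => if PySem.Chars.isIn "CURRENT".toList ln then "current".toList else "completed".toList
  | none =>
    if PySem.Chars.isIn "CURRENT".toList h then "current".toList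
    else if PySem.Chars.isIn "Complete".toList h then "completed".toList
    else "planned".toList

def pvB_goal (body : List (List Char)) : Option (List Char) :=
  (body.reverse.find? (fun ln => !pvB_statusLine ln && PySem.Chars.isIn "Goal:".toList ln)).map
    (fun ln => PySem.Chars.strip ((PySem.Chars.splitOnMax ln ":".toList 1).getD 1 []))

def pvB_row (k : Int) (name status : List Char) (goal : Option (List Char)) : List Char :=
  "  - id: \"milestone_".toList ++ PySem.Int.toChars k ++ "\"\n    name: \"".toList ++ name
  ++ "\"\n    status: \"".toList ++ status ++ "\"\n".toList
  ++ (match goal with | some g => "    goal: \"".toList ++ g ++ "\"\n".toList | none => [])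

def format_timeline_section_py_alt (title : String) (content : List String) : String :=
  let contentL := content.map String.toList
  let blocks := (pvB_split contentL).1
  let yaml := if blocks.isEmpty then []
    else "<!-- DATA:milestones:START -->\n```yaml\nmilestones:\n".toList
      ++ ((PySem.List.enumerate blocks 1).map (fun kb =>
            pvB_row kb.1 kb.2.1 (pvB_status kb.2.1 kb.2.2) (pvB_goal kb.2.2))).flatten
      ++ "```\n<!-- DATA:milestones:END -->\n\n".toList
  String.ofList ("\n<!-- SECTION:memory:timeline:START -->\n## ".toList ++ title.toList
             ++ "\n\n".toList ++ yaml ++ PySem.Chars.join "\n".toList contentL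
             ++ "\n<!-- SECTION:memory:timeline:END -->\n".toList)

-- ===== PRECONDITION & SPEC =====
def Spec_format_timeline_section_py (title : String) (content : List String) (out : String) : Prop := out = format_timeline_section_py_alt title content
instance (title : String) (content : List String) (out : String) : Decidable (Spec_format_timeline_section_py title content out) := by unfold Spec_format_timeline_section_py; infer_instance

-- ===== CLAIM (what is proved, stated in full; the proofs are below) =====
def Claim_equal_format_timeline_section_py : Prop := ∀ (title : String) (content : List String), Dom_format_timeline_section_py title content → Spec_format_timeline_section_py title content (format_timeline_section_py title content)

-- ===== LEMMAS AND PROOFS =====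

-- A's value of the open milestone whose header gave name n and whose body lines so far are b
def pvEvalA (n : List Char) (b : List (List Char)) : List Char × List Char × Option (List Char) :=
  b.foldl pvA_upd (pvA_new n)

def pvEvalBlk (hb : List Char × List (List Char)) : List Char × List Char × Option (List Char) :=
  (hb.1, pvB_status hb.1 hb.2, pvB_goal hb.2)

-- per block: A's fold over the body = B's backward searches
theorem pvEval_eq (n : List Char) (b : List (List Char)) : pvEvalA n b = pvEvalBlk (n, b) := by
  induction b using List.reverseRecOn with
  | nil => rfl
  | append_singleton b x ih =>
    have hA : pvEvalA n (b ++ [x]) = pvA_upd (pvEvalA n b) x := by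
      simp [pvEvalA, List.foldl_append]
    rw [hA, ih]
    by_cases h1 : PySem.Chars.isIn ['C', 'U', 'R', 'R', 'E', 'N', 'T'] x
    · simp [pvEvalBlk, pvA_upd, pvB_status, pvB_goal, pvB_statusLine, h1, List.reverse_append]
    · by_cases h2 : PySem.Chars.isIn ['✅'] x
      · simp [pvEvalBlk, pvA_upd, pvB_status, pvB_goal, pvB_statusLine, h1, h2, List.reverse_append]
      · by_cases h3 : PySem.Chars.isIn ['C', 'o', 'm', 'p', 'l', 'e', 't', 'e'] x
        · simp [pvEvalBlk, pvA_upd, pvB_status, pvB_goal, pvB_statusLine, h1, h2, h3,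
            List.reverse_append]
        · by_cases h4 : PySem.Chars.isIn ['G', 'o', 'a', 'l', ':'] x
          · simp [pvEvalBlk, pvA_upd, pvB_status, pvB_goal, pvB_statusLine, h1, h2, h3, h4,
              List.reverse_append]
          · simp [pvEvalBlk, pvA_upd, pvB_status, pvB_goal, pvB_statusLine, h1, h2, h3, h4,
              List.reverse_append]

def pvFinA (st : List (List Char × List Char × Option (List Char)) ×
            Option (List Char × List Char × Option (List Char))) :
    List (List Char × List Char × Option (List Char)) :=
  match st.2 with | some m => st.1 ++ [m] | none => st.1

-- A's whole loop vs B's reversed-pass splitter, both with their accumulators generalized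
theorem pvLoop_eq (c : List (List Char)) :
    (∀ ms, pvFinA (c.foldl pvA_step (ms, none)) = ms ++ (pvB_split c).1.map pvEvalBlk) ∧
    (∀ ms n b, pvFinA (c.foldl pvA_step (ms, some (pvEvalA n b))) =
      ms ++ [pvEvalA n (b ++ (pvB_split c).2)] ++ (pvB_split c).1.map pvEvalBlk) := by
  induction c with
  | nil => exact ⟨fun ms => by simp [pvB_split, pvFinA],
      fun ms n b => by simp [pvB_split, pvFinA, pvEval_eq]⟩
  | cons line rest ih =>
    have hsplit : pvB_split (line :: rest) =
        (if pvB_isHeader line then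
          ((PySem.List.slice (PySem.Chars.strip line) (some 4) none, (pvB_split rest).2)
            :: (pvB_split rest).1, [])
         else ((pvB_split rest).1, line :: (pvB_split rest).2)) := rfl
    by_cases h : pvB_isHeader line
    · have h' : (PySem.Chars.startswith (PySem.Chars.strip line)
            ['#', '#', '#', ' ', 'W', 'e', 'e', 'k'] ||
          PySem.Chars.startswith (PySem.Chars.strip line)
            ['#', '#', '#', ' ', 'P', 'h', 'a', 's', 'e']) = true := by
        simpa [pvB_isHeader] using h
      have hstep : ∀ st, pvA_step st line =
          (pvFinA st, some (pvA_new (PySem.List.slice (PySem.Chars.strip line) (some 4) none))) := by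
        intro st
        cases hst : st.2 <;> simp [pvA_step, pvFinA, h', hst]
      constructor
      · intro ms
        rw [List.foldl_cons, hstep]
        have hh := ih.2 (pvFinA (ms, none))
          (PySem.List.slice (PySem.Chars.strip line) (some 4) none) []
        simp only [show pvEvalA (PySem.List.slice (PySem.Chars.strip line) (some 4) none) [] =
            pvA_new (PySem.List.slice (PySem.Chars.strip line) (some 4) none) from rfl,
          List.nil_append] at hh
        rw [hh]
        simp [hsplit, h, pvFinA]
        exact pvEval_eq _ _
      · intro ms n b
        rw [List.foldl_cons, hstep]
        have hh := ih.2 (pvFinA (ms, some (pvEvalA n b)))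
          (PySem.List.slice (PySem.Chars.strip line) (some 4) none) []
        simp only [show pvEvalA (PySem.List.slice (PySem.Chars.strip line) (some 4) none) [] =
            pvA_new (PySem.List.slice (PySem.Chars.strip line) (some 4) none) from rfl,
          List.nil_append] at hh
        rw [hh]
        simp [hsplit, h, pvFinA]
        exact pvEval_eq _ _
    · have h' : PySem.Chars.startswith (PySem.Chars.strip line)
            ['#', '#', '#', ' ', 'W', 'e', 'e', 'k'] = false ∧
          PySem.Chars.startswith (PySem.Chars.strip line)
            ['#', '#', '#', ' ', 'P', 'h', 'a', 's', 'e'] = false := by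
        simpa [pvB_isHeader] using h
      constructor
      · intro ms
        have hstep : pvA_step (ms, none) line = (ms, none) := by
          simp [pvA_step, h'.1, h'.2]
        rw [List.foldl_cons, hstep]
        rw [ih.1 ms]
        simp [hsplit, h]
      · intro ms n b
        have hstep : pvA_step (ms, some (pvEvalA n b)) line =
            (ms, some (pvEvalA n (b ++ [line]))) := by
          simp [pvA_step, h'.1, h'.2, pvEvalA, List.foldl_append]
        rw [List.foldl_cons, hstep]
        rw [ih.2 ms n (b ++ [line])]
        simp [hsplit, h]

-- A's yaml item fold over milestone_data = concatenation of B's rows (ids shifted by one)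
theorem pvRows_eq (blocks : List (List Char × List (List Char))) : ∀ (i : Int) (out : List Char),
    (((PySem.List.enumerate (blocks.map pvEvalBlk) i).map (fun im =>
        [("id".toList, "milestone_".toList ++ PySem.Int.toChars (im.1 + 1)),
         ("name".toList, im.2.1), ("status".toList, im.2.2.1)]
        ++ (match im.2.2.2 with | some g => [("goal".toList, g)] | none => []))).foldl
      (pvA_item "  ".toList) out)
    = out ++ ((PySem.List.enumerate blocks (i + 1)).map (fun kb =>
        pvB_row kb.1 kb.2.1 (pvB_status kb.2.1 kb.2.2) (pvB_goal kb.2.2))).flatten := by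
  induction blocks with
  | nil => intro i out; simp [PySem.List.enumerate]
  | cons b bs ih =>
    intro i out
    simp only [List.map_cons, PySem.List.enumerate_cons, List.foldl_cons, List.flatten_cons]
    rw [ih]
    cases hg : pvB_goal b.2 <;>
      simp [pvA_item, pvB_row, pvEvalBlk, hg, List.append_assoc, add_assoc]

-- ===== VERDICT (by name: the statement is the Claim_ definition above) =====
theorem format_timeline_section_py_spec : Claim_equal_format_timeline_section_py := by
  intro title content _
  unfold Spec_format_timeline_section_py
  have hms := (pvLoop_eq (content.map String.toList)).1 []
  simp only [pvFinA, List.nil_append] at hms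
  have hrows := pvRows_eq ((pvB_split (content.map String.toList)).1) 0 []
  simp only [List.nil_append, zero_add] at hrows
  cases hbs : (pvB_split (content.map String.toList)).1 with
  | nil =>
    simp only [format_timeline_section_py, format_timeline_section_py_alt, hbs] at hms ⊢
    simp [hms]
  | cons blk blks =>
    simp only [format_timeline_section_py, format_timeline_section_py_alt, hbs] at hms hrows ⊢
    rw [hms]
    simp only [pvA_yaml, pvA_items, pvA_mdata]
    rw [hrows]
    simp [List.append_assoc]
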